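-- pv_equiv track=rewrite | github.com/junyeong-nero/ps | programmers/graph/가짜-헤밀토니안.py | solution
-- ===== SOURCE A (Python) =====
-- from collections import defaultdict
--
-- def solution(t):
--     n = len(t)
--     graph = defaultdict(list)
--
--     for u, v in t:
--         graph[u].append(v)
--         graph[v].append(u)
--
--     visited = [0] * (n + 1)
--
--     # unique_count를 인자로 넘겨 O(1)로 고유 방문자 수를 계산 (시간 초과 해결)
--     def check(node, unique_count):
--         if visited[node] == 2:
--             return 0
--
--         # 처음 방문하는 노드일 때만 고유 개수 +1
--         if visited[node] == 0:
--             unique_count += 1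
--
--         visited[node] += 1
--
--         res = unique_count
--         for neigh in graph[node]:
--             if visited[neigh] < 2:
--                 # 다음 노드로 넘어갈 때 갱신된 unique_count를 그대로 전달
--                 res = max(res, check(neigh, unique_count))
--
--         visited[node] -= 1
--         return res
--
--     res = 0
--     # 끝점(Leaf Node)에서만 탐색 시작
--     leaf_nodes = [node for node in graph if len(graph[node]) == 1]
--
--     # 노드가 1개이거나 간선이 없는 예외 처리
--     if not leaf_nodes:
--         leaf_nodes = list(graph.keys())
--
--     for node in leaf_nodes:
--         temp = check(node, 0)
--         res = max(res, temp)
--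
--     return res
-- ===== SOURCE B (Python) =====
-- def solution(t):
--     n = len(t)
--     graph = {}
--     for u, v in t:
--         graph[u] = graph.get(u, []) + [v]
--         graph[v] = graph.get(v, []) + [u]
--
--     starts = [x for x in graph if len(graph[x]) == 1]
--     if not starts:
--         starts = list(graph)
--
--     visited = [0] * (n + 1)
--     best = 0
--     # iterative backtracking with an explicit stack of (node, entering) frames
--     for s in starts:
--         stack = [(s, True)]
--         while stack:
--             node, entering = stack.pop()
--             if entering:
--                 if visited[node] == 2:
--                     continue
--                 visited[node] += 1
--                 best = max(best, sum(1 for x in visited if x > 0))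
--                 stack.append((node, False))
--                 for neigh in reversed(graph[node]):
--                     if visited[neigh] < 2:
--                         stack.append((neigh, True))
--             else:
--                 visited[node] -= 1
--     return best
-- ===== Notes on version B (the rewrite author's own statement) =====
-- stated objective: alternative
-- what changed: The recursive backtracking check threading a unique_count accumulator is replaced by an iterative DFS driven by an explicit stack of (node, entering) frames with undo frames for backtracking, recounting the distinct-visited nodes from the visited array at each entry instead of threading an accumulator.
-- outside the precondition, e.g. on solution([(1, 2), (2, 3), (50, 50)]): A returns 3, B returns 3
import Mathlib
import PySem

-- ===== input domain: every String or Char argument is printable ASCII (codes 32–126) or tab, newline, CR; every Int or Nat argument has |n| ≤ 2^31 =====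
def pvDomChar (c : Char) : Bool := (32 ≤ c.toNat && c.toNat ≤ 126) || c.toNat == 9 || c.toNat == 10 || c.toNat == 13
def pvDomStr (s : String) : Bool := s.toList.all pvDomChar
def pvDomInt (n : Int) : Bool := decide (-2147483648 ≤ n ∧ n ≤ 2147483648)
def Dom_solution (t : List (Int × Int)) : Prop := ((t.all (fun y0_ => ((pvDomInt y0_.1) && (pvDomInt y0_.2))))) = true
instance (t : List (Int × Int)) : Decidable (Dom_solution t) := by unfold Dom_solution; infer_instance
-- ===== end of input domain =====

-- B replaces the recursive backtracking check (which threads a unique_count accumulator) by an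
-- iterative DFS over an explicit stack of (node, entering) frames that recounts the distinct-visited
-- nodes from the visited array at each entry (alternative decomposition, not faster).


-- ===== PORT A =====
-- Python's list indexing visited[node]: a negative index in [-(len), -1] wraps; Pre_ restricts to
-- indices Python accepts, so this wrap-then-Nat index is exact on Pre_.
def pvWrap (m : Nat) (i : Int) : Nat := (if i < 0 then i + (m : Int) else i).toNat

-- graph[u].append(v) on a defaultdict(list)
def pvGraph (t : List (Int × Int)) : PySem.Dict Int (List Int) :=
  t.foldl (fun g p => (g.modify p.1 [] (· ++ [p.2])).modify p.2 [] (· ++ [p.1])) PySem.Dict.empty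

-- the inner `check(node, unique_count)`; fuel bounds the recursion depth (each call increments a
-- visited cell that stays < 2, so depth ≤ 2*(n+1); fuel 2*n+3 is never exhausted on Pre_ inputs)
def checkA (g : PySem.Dict Int (List Int)) : Nat → Int → Int → List Int → Int × List Int
  | 0, _, _, s => (0, s)
  | fuel + 1, node, u, s =>
    let i := pvWrap s.length node
    if s.getD i 0 = 2 then (0, s)
    else
      let u' := if s.getD i 0 = 0 then u + 1 else u
      let s1 := s.set i (s.getD i 0 + 1)
      let p := (g.getD node []).foldl (fun acc neigh =>
          if acc.2.getD (pvWrap acc.2.length neigh) 0 < 2 then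
            let q := checkA g fuel neigh u' acc.2
            (max acc.1 q.1, q.2)
          else acc) (u', s1)
      (p.1, p.2.set i (p.2.getD i 0 - 1))

def solution (t : List (Int × Int)) : Int :=
  let n := t.length
  let g := pvGraph t
  let visited : List Int := List.replicate (n + 1) 0
  let leaf := g.keys.filter (fun k => (g.getD k []).length = 1)
  let leaf := if leaf = [] then g.keys else leaf
  leaf.foldl (fun res node => max res (checkA g (2 * n + 3) node 0 visited).1) 0

-- ===== PORT B =====
-- `graph[u] = graph.get(u, []) + [v]` (plain dict, overwrite in place)
def pvGraphB (t : List (Int × Int)) : PySem.Dict Int (List Int) :=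
  t.foldl (fun g p =>
      let g1 := g.insert p.1 (g.getD p.1 [] ++ [p.2])
      g1.insert p.2 (g1.getD p.2 [] ++ [p.1]))
    PySem.Dict.empty

-- sum(1 for x in visited if x > 0)
def pvCntPos (s : List Int) : Int := (s.countP (fun x => decide (0 < x)) : Int)

-- the `while stack:` loop: pop a (node, entering) frame, enter or undo; fuel counts loop
-- iterations (totality device only; solution_alt passes enough for the whole traversal)
def runB (g : PySem.Dict Int (List Int)) : Nat → List (Int × Bool) → List Int → Int → Int × List Int
  | 0, _, s, best => (best, s)
  | _ + 1, [], s, best => (best, s)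
  | fuel + 1, (node, entering) :: stack, s, best =>
    if entering then
      if s.getD (pvWrap s.length node) 0 = 2 then runB g fuel stack s best
      else
        let s1 := s.set (pvWrap s.length node) (s.getD (pvWrap s.length node) 0 + 1)
        let best1 := max best (pvCntPos s1)
        let stack1 := (g.getD node []).reverse.foldl
            (fun st m => if s1.getD (pvWrap s1.length m) 0 < 2 then (m, true) :: st else st)
            ((node, false) :: stack)
        runB g fuel stack1 s1 best1
    else
      runB g fuel stack (s.set (pvWrap s.length node) (s.getD (pvWrap s.length node) 0 - 1)) best

def solution_alt (t : List (Int × Int)) : Int :=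
  let n := t.length
  let g := pvGraphB t
  let starts := g.keys.filter (fun x => (g.getD x []).length = 1)
  let starts := if starts = [] then g.keys else starts
  (starts.foldl
      (fun acc x => runB g ((2 * n + 2) ^ (2 * n + 3) + 1) [(x, true)] acc.2 acc.1)
      (0, List.replicate (n + 1) (0 : Int))).1

-- ===== PRECONDITION & SPEC =====
-- Pre_ excludes the inputs with an edge endpoint outside [-(len(t)+1), len(t)]: indexing
-- visited (length len(t)+1) with such a label raises IndexError whenever the DFS reaches it;
-- if the out-of-range label sits in a component the DFS never starts in, A (and B) still return,
-- and they agree there — Pre_ is slightly narrower than A's exact return domain because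
-- reachability is not a closed-form condition.
def Pre_solution (t : List (Int × Int)) : Prop :=
  ∀ p ∈ t, (-((t.length : Int) + 1) ≤ p.1 ∧ p.1 ≤ (t.length : Int)) ∧
           (-((t.length : Int) + 1) ≤ p.2 ∧ p.2 ≤ (t.length : Int))
instance (t : List (Int × Int)) : Decidable (Pre_solution t) := by unfold Pre_solution; infer_instance

def pvWitness_solution : (List (Int × Int)) := [(1, 2), (2, 3), (3, 1)]

def Spec_solution (t : List (Int × Int)) (out : Int) : Prop := out = solution_alt t
instance (t : List (Int × Int)) (out : Int) : Decidable (Spec_solution t out) := by unfold Spec_solution; infer_instance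

-- ===== CLAIM (what is proved, stated in full; the proofs are below) =====
def Claim_equal_solution : Prop := ∀ (t : List (Int × Int)), Dom_solution t → Pre_solution t → Spec_solution t (solution t)

-- ===== LEMMAS AND PROOFS =====

-- the two graph builders are definitionally the same dict
theorem pvGraphB_eq (t : List (Int × Int)) : pvGraphB t = pvGraph t := rfl

-- distinct-visited count after writing cell i
theorem cnt_set (s : List Int) (i : Nat) (hi : i < s.length) (w : Int) :
    pvCntPos (s.set i w) =
      pvCntPos s - (if 0 < s[i] then 1 else 0) + (if 0 < w then 1 else 0) := by
  unfold pvCntPos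
  rw [List.countP_set hi]
  have hle : (if 0 < s[i] then 1 else 0) ≤ s.countP (fun x => decide (0 < x)) := by
    split_ifs with h
    · have hpos : 0 < s.countP (fun x => decide (0 < x)) :=
        List.countP_pos_iff.mpr ⟨s[i], s.getElem_mem hi, by simpa using h⟩
      omega
    · exact Nat.zero_le _
  simp only [decide_eq_true_eq]
  split_ifs at hle ⊢ <;> push_cast <;> omega

theorem pvWrap_lt (n : Nat) (x : Int) (h1 : -((n : Int) + 1) ≤ x) (h2 : x ≤ (n : Int)) :
    pvWrap (n + 1) x < n + 1 := by
  unfold pvWrap; split_ifs <;> omega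

theorem cnt_replicate (n : Nat) : pvCntPos (List.replicate n 0) = 0 := by
  unfold pvCntPos
  induction n with
  | zero => rfl
  | succ k ih => simp [List.replicate_succ, ih]

-- every key / neighbour of the built graph is an edge endpoint (closure under a predicate)
theorem graph_sound (P : Int → Prop) : ∀ (t : List (Int × Int)) (d : PySem.Dict Int (List Int)),
    (∀ p ∈ t, P p.1 ∧ P p.2) →
    (∀ k ∈ d.keys, P k) → (∀ k m, m ∈ d.getD k [] → P m) →
    (∀ k ∈ (t.foldl (fun g p => (g.modify p.1 [] (· ++ [p.2])).modify p.2 [] (· ++ [p.1])) d).keys, P k) ∧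
    (∀ k m, m ∈ (t.foldl (fun g p => (g.modify p.1 [] (· ++ [p.2])).modify p.2 [] (· ++ [p.1])) d).getD k [] → P m) := by
  intro t
  induction t with
  | nil => intro d _ hk hv; exact ⟨hk, hv⟩
  | cons p rest ih =>
    intro d hp hk hv
    simp only [List.foldl_cons]
    refine ih _ (fun q hq => hp q (List.mem_cons_of_mem _ hq)) ?_ ?_
    · intro k hkmem
      rw [PySem.Dict.keys_modify] at hkmem
      rcases (PySem.Dict.mem_keys_insert _ _ _ _).mp hkmem with h | h
      · exact h ▸ (hp p List.mem_cons_self).2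
      · rw [PySem.Dict.keys_modify] at h
        rcases (PySem.Dict.mem_keys_insert _ _ _ _).mp h with h' | h'
        · exact h' ▸ (hp p List.mem_cons_self).1
        · exact hk k h'
    · intro k m hm
      rw [PySem.Dict.getD_modify] at hm
      by_cases h1 : k = p.2
      · rw [if_pos h1, PySem.Dict.getD_modify] at hm
        rcases List.mem_append.mp hm with h | h
        · by_cases h0 : p.2 = p.1
          · rw [if_pos h0] at h
            rcases List.mem_append.mp h with h'' | h''
            · exact hv p.1 m h''
            · exact (List.mem_singleton.mp h'') ▸ (hp p List.mem_cons_self).2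
          · rw [if_neg h0] at h
            exact hv p.2 m h
        · exact (List.mem_singleton.mp h) ▸ (hp p List.mem_cons_self).1
      · rw [if_neg h1, PySem.Dict.getD_modify] at hm
        by_cases h0 : k = p.1
        · rw [if_pos h0] at hm
          rcases List.mem_append.mp hm with h | h
          · exact hv p.1 m h
          · exact (List.mem_singleton.mp h) ▸ (hp p List.mem_cons_self).2
        · rw [if_neg h0] at hm
          exact hv k m hm

-- adjacency lists of the built graph have at most 2*|t| entries
theorem graph_deg : ∀ (t : List (Int × Int)) (d : PySem.Dict Int (List Int)) (c : Nat),
    (∀ k, ((d.getD k [] : List Int)).length ≤ c) →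
    ∀ k, (((t.foldl (fun g p => (g.modify p.1 [] (· ++ [p.2])).modify p.2 [] (· ++ [p.1])) d).getD k [] : List Int)).length ≤ c + 2 * t.length := by
  intro t
  induction t with
  | nil => intro d c h k; simpa using h k
  | cons p rest ih =>
    intro d c h k
    simp only [List.foldl_cons]
    have hstep : ∀ k', ((((d.modify p.1 [] (· ++ [p.2])).modify p.2 [] (· ++ [p.1])).getD k' [] : List Int)).length ≤ c + 2 := by
      intro k'
      rw [PySem.Dict.getD_modify]
      by_cases h2 : k' = p.2
      · rw [if_pos h2, PySem.Dict.getD_modify, List.length_append]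
        by_cases h1 : p.2 = p.1
        · rw [if_pos h1, List.length_append]
          have := h p.1
          simp only [List.length_singleton]
          omega
        · rw [if_neg h1]
          have := h p.2
          simp only [List.length_singleton]
          omega
      · rw [if_neg h2, PySem.Dict.getD_modify]
        by_cases h1 : k' = p.1
        · rw [if_pos h1, List.length_append]
          have := h p.1
          simp only [List.length_singleton]
          omega
        · rw [if_neg h1]
          have := h k'
          omega
    have := ih _ (c + 2) hstep k
    simp only [List.length_cons]
    omega

-- fold-max algebra
theorem foldl_max_init (F : Int → Int) : ∀ (l : List Int) (a : Int),
    a ≤ l.foldl (fun r m => max r (F m)) a := by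
  intro l
  induction l with
  | nil => intro a; exact le_refl a
  | cons x xs ih => intro a; exact le_trans (le_max_left a (F x)) (ih (max a (F x)))

theorem foldl_max_pull (F : Int → Int) : ∀ (l : List Int) (a b : Int),
    l.foldl (fun r m => max r (F m)) (max a b) = max a (l.foldl (fun r m => max r (F m)) b) := by
  intro l
  induction l with
  | nil => intro a b; rfl
  | cons x xs ih => intro a b; simp only [List.foldl_cons, max_assoc]; exact ih a (max b (F x))

-- the backtracking recursion restores the visited array
theorem checkA_restore (g : PySem.Dict Int (List Int)) (L : Nat)
    (HG : ∀ k m, m ∈ g.getD k [] → pvWrap L m < L) :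
    ∀ (f : Nat) (node u : Int) (s : List Int), s.length = L → pvWrap L node < L →
      (checkA g f node u s).2 = s := by
  intro f
  induction f with
  | zero => intro node u s _ _; rfl
  | succ f IH =>
    intro node u s hL hn
    simp only [checkA]
    by_cases h2 : s.getD (pvWrap s.length node) 0 = 2
    · rw [if_pos h2]
    · rw [if_neg h2]
      have hi : pvWrap s.length node < s.length := by rw [hL]; exact hn
      have hv : s.getD (pvWrap s.length node) 0 = s[pvWrap s.length node] :=
        List.getD_eq_getElem s 0 hi
      have hlen1 : (s.set (pvWrap s.length node) (s.getD (pvWrap s.length node) 0 + 1)).length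
          = s.length := by simp
      have key : ∀ (l : List Int), (∀ m ∈ l, pvWrap L m < L) →
          ∀ (acc : Int × List Int),
            acc.2 = s.set (pvWrap s.length node) (s.getD (pvWrap s.length node) 0 + 1) →
          (l.foldl (fun acc neigh =>
              if acc.2.getD (pvWrap acc.2.length neigh) 0 < 2 then
                ((max acc.1 (checkA g f neigh (if s.getD (pvWrap s.length node) 0 = 0 then u + 1 else u) acc.2).1,
                  (checkA g f neigh (if s.getD (pvWrap s.length node) 0 = 0 then u + 1 else u) acc.2).2) : Int × List Int)
              else acc) acc).2
            = s.set (pvWrap s.length node) (s.getD (pvWrap s.length node) 0 + 1) := by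
        intro l
        induction l with
        | nil => intro _ acc h; exact h
        | cons m rest ihl =>
          intro hml acc h
          simp only [List.foldl_cons]
          by_cases hc : acc.2.getD (pvWrap acc.2.length m) 0 < 2
          · rw [if_pos hc]
            refine ihl (fun x hx => hml x (List.mem_cons_of_mem _ hx)) _ ?_
            simp only [h]
            exact IH m _ _ (by rw [hlen1, hL]) (hml m List.mem_cons_self)
          · rw [if_neg hc]
            exact ihl (fun x hx => hml x (List.mem_cons_of_mem _ hx)) _ h
      have hp2 := key (g.getD node []) (fun m hm => HG node m hm)
        ((if s.getD (pvWrap s.length node) 0 = 0 then u + 1 else u),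
          s.set (pvWrap s.length node) (s.getD (pvWrap s.length node) 0 + 1)) rfl
      simp only [hp2]
      have hi1 : pvWrap s.length node <
          (s.set (pvWrap s.length node) (s.getD (pvWrap s.length node) 0 + 1)).length := by
        rw [hlen1]; exact hi
      have hs1i : (s.set (pvWrap s.length node) (s.getD (pvWrap s.length node) 0 + 1)).getD
          (pvWrap s.length node) 0 = s.getD (pvWrap s.length node) 0 + 1 := by
        rw [List.getD_eq_getElem _ 0 hi1, List.getElem_set_self hi1]
      rw [hs1i, List.set_set]
      have harith : s.getD (pvWrap s.length node) 0 + 1 - 1 = s.getD (pvWrap s.length node) 0 := by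
        omega
      rw [harith, hv, List.set_getElem_self hi]

-- characterization of checkA's value at a node it actually enters, as a fold over the
-- neighbours admissible in the post-increment state (state fixed thanks to restoration)
theorem checkA_char (g : PySem.Dict Int (List Int)) (L : Nat)
    (HG : ∀ k m, m ∈ g.getD k [] → pvWrap L m < L)
    (f : Nat) (node u : Int) (s : List Int) (hL : s.length = L) (hn : pvWrap L node < L)
    (h2 : ¬ s.getD (pvWrap L node) 0 = 2) :
    checkA g (f + 1) node u s =
      (((g.getD node []).filter
          (fun m => decide ((s.set (pvWrap L node) (s.getD (pvWrap L node) 0 + 1)).getD (pvWrap L m) 0 < 2))).foldl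
        (fun r m => max r (checkA g f m (if s.getD (pvWrap L node) 0 = 0 then u + 1 else u)
            (s.set (pvWrap L node) (s.getD (pvWrap L node) 0 + 1))).1)
        (if s.getD (pvWrap L node) 0 = 0 then u + 1 else u), s) := by
  subst hL
  simp only [checkA]
  rw [if_neg h2]
  have hi : pvWrap s.length node < s.length := hn
  have hv : s.getD (pvWrap s.length node) 0 = s[pvWrap s.length node] :=
    List.getD_eq_getElem s 0 hi
  have hlen1 : (s.set (pvWrap s.length node) (s.getD (pvWrap s.length node) 0 + 1)).length
      = s.length := by simp
  have key : ∀ (l : List Int), (∀ m ∈ l, pvWrap s.length m < s.length) → ∀ (r : Int),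
      l.foldl (fun acc neigh =>
          if acc.2.getD (pvWrap acc.2.length neigh) 0 < 2 then
            ((max acc.1 (checkA g f neigh (if s.getD (pvWrap s.length node) 0 = 0 then u + 1 else u) acc.2).1,
              (checkA g f neigh (if s.getD (pvWrap s.length node) 0 = 0 then u + 1 else u) acc.2).2) : Int × List Int)
          else acc)
        (r, s.set (pvWrap s.length node) (s.getD (pvWrap s.length node) 0 + 1))
      = ((l.filter (fun m => decide ((s.set (pvWrap s.length node) (s.getD (pvWrap s.length node) 0 + 1)).getD (pvWrap s.length m) 0 < 2))).foldl
          (fun r m => max r (checkA g f m (if s.getD (pvWrap s.length node) 0 = 0 then u + 1 else u)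
              (s.set (pvWrap s.length node) (s.getD (pvWrap s.length node) 0 + 1))).1) r,
        s.set (pvWrap s.length node) (s.getD (pvWrap s.length node) 0 + 1)) := by
    intro l
    induction l with
    | nil => intro _ r; rfl
    | cons m rest ihl =>
      intro hml r
      simp only [List.foldl_cons, List.filter_cons, hlen1]
      by_cases hc : (s.set (pvWrap s.length node) (s.getD (pvWrap s.length node) 0 + 1)).getD (pvWrap s.length m) 0 < 2
      · rw [if_pos hc]
        rw [checkA_restore g s.length HG f m _ _ hlen1 (hml m List.mem_cons_self)]
        simp only [hc, decide_true, if_true, List.foldl_cons]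
        exact ihl (fun x hx => hml x (List.mem_cons_of_mem _ hx)) _
      · rw [if_neg hc]
        simp only [hc, decide_false, Bool.false_eq_true, if_false]
        exact ihl (fun x hx => hml x (List.mem_cons_of_mem _ hx)) _
  rw [key (g.getD node []) (fun m hm => HG node m hm) _]
  have hi1 : pvWrap s.length node <
      (s.set (pvWrap s.length node) (s.getD (pvWrap s.length node) 0 + 1)).length := by
    rw [hlen1]; exact hi
  have hs1i : (s.set (pvWrap s.length node) (s.getD (pvWrap s.length node) 0 + 1)).getD
      (pvWrap s.length node) 0 = s.getD (pvWrap s.length node) 0 + 1 := by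
    rw [List.getD_eq_getElem _ 0 hi1, List.getElem_set_self hi1]
  rw [hs1i, List.set_set]
  have harith : s.getD (pvWrap s.length node) 0 + 1 - 1 = s.getD (pvWrap s.length node) 0 := by omega
  rw [harith, hv, List.set_getElem_self hi]

theorem checkA_nonneg (g : PySem.Dict Int (List Int)) (L : Nat)
    (HG : ∀ k m, m ∈ g.getD k [] → pvWrap L m < L) :
    ∀ (f : Nat) (node u : Int) (s : List Int), s.length = L → pvWrap L node < L →
      0 ≤ u → 0 ≤ (checkA g f node u s).1 := by
  intro f node u s hL hn hu
  cases f with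
  | zero => exact le_refl 0
  | succ f =>
    by_cases h2 : s.getD (pvWrap L node) 0 = 2
    · simp only [checkA, hL, if_pos h2]
      exact le_refl 0
    · rw [checkA_char g L HG f node u s hL hn h2]
      have h1 : (0 : Int) ≤ (if s.getD (pvWrap L node) 0 = 0 then u + 1 else u) := by
        split_ifs <;> omega
      exact le_trans h1 (foldl_max_init _ _ _)

-- pushing the guarded reversed adjacency equals prepending the guarded children in order
theorem push_children (s1 : List Int) : ∀ (l : List Int) (st : List (Int × Bool)),
    l.reverse.foldl (fun st m => if s1.getD (pvWrap s1.length m) 0 < 2 then (m, true) :: st else st) st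
      = (l.filter (fun m => decide (s1.getD (pvWrap s1.length m) 0 < 2))).map (fun m => (m, true)) ++ st := by
  intro l
  induction l with
  | nil => intro st; rfl
  | cons x xs ih =>
    intro st
    rw [List.reverse_cons, List.foldl_append]
    simp only [List.foldl_cons, List.foldl_nil, List.filter_cons]
    by_cases h : s1.getD (pvWrap s1.length x) 0 < 2
    · rw [if_pos h, ih]
      simp only [h, decide_true, if_true, List.map_cons]
      rfl
    · rw [if_neg h, ih]
      simp only [h, decide_false, Bool.false_eq_true, if_false]

-- remaining "budget" of the visited array: Σ (2 - cell)⁺; each entered node decreases it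
def pvM (s : List Int) : Nat := (s.map (fun x => (2 - x).toNat)).sum

theorem pvM_set : ∀ (s : List Int) (i : Nat), i < s.length → s.getD i 0 < 2 →
    pvM (s.set i (s.getD i 0 + 1)) + 1 = pvM s := by
  intro s
  induction s with
  | nil => intro i hi; simp at hi
  | cons x xs ih =>
    intro i hi hlt
    cases i with
    | zero =>
      simp only [List.getD_cons_zero] at hlt ⊢
      simp only [List.set_cons_zero, pvM, List.map_cons, List.sum_cons]
      omega
    | succ j =>
      simp only [List.getD_cons_succ] at hlt ⊢
      simp only [List.set_cons_succ, pvM, List.map_cons, List.sum_cons]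
      have := ih j (by simpa using hi) hlt
      unfold pvM at this
      omega

theorem runB_nil (g : PySem.Dict Int (List Int)) (f : Nat) (s : List Int) (b : Int) :
    runB g f [] s b = (b, s) := by
  cases f <;> rfl

-- SIMULATION: processing one enter-frame of the stack machine computes exactly
-- max best (checkA …) and restores the visited array, in some number k of loop iterations
theorem simB (g : PySem.Dict Int (List Int)) (L D : Nat)
    (HG : ∀ k m, m ∈ g.getD k [] → pvWrap L m < L)
    (HD : ∀ k, ((g.getD k [] : List Int)).length ≤ D) :
    ∀ (fA : Nat) (node : Int) (s : List Int),
      s.length = L → (∀ x ∈ s, x ≤ 2) → pvWrap L node < L → pvM s < fA →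
      ∃ k, k ≤ (D + 2) ^ fA ∧ ∀ (stack : List (Int × Bool)) (best : Int) (fB : Nat),
        0 ≤ best → k ≤ fB →
        runB g fB ((node, true) :: stack) s best
          = runB g (fB - k) stack s (max best (checkA g fA node (pvCntPos s) s).1) := by
  intro fA
  induction fA with
  | zero => intro node s _ _ _ hM; exact absurd hM (Nat.not_lt_zero _)
  | succ f IH =>
    intro node s hL hInv hn hM
    have hone : 1 ≤ (D + 2) ^ (f + 1) := Nat.one_le_pow _ _ (by omega)
    by_cases h2 : s.getD (pvWrap L node) 0 = 2
    · refine ⟨1, hone, ?_⟩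
      intro stack best fB hb hfb
      cases fB with
      | zero => omega
      | succ fb =>
        simp only [runB, if_true]
        rw [hL, if_pos h2]
        simp only [checkA, hL, if_pos h2]
        rw [max_eq_left hb]
        norm_num
    · -- the node is actually entered
      have hi : pvWrap L node < s.length := by rw [hL]; exact hn
      have hv : s.getD (pvWrap L node) 0 = s[pvWrap L node] := List.getD_eq_getElem s 0 hi
      have hcl : s.getD (pvWrap L node) 0 < 2 := by
        have := hInv _ (s.getElem_mem hi)
        omega
      have hL1 : (s.set (pvWrap L node) (s.getD (pvWrap L node) 0 + 1)).length = L := by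
        rw [List.length_set]; exact hL
      have hInv1 : ∀ x ∈ s.set (pvWrap L node) (s.getD (pvWrap L node) 0 + 1), x ≤ 2 := by
        intro x hx
        rcases List.mem_or_eq_of_mem_set hx with h | h
        · exact hInv x h
        · omega
      have hM1 : pvM (s.set (pvWrap L node) (s.getD (pvWrap L node) 0 + 1)) + 1 = pvM s :=
        pvM_set s (pvWrap L node) hi hcl
      have hu' : (if s.getD (pvWrap L node) 0 = 0 then pvCntPos s + 1 else pvCntPos s)
          = pvCntPos (s.set (pvWrap L node) (s.getD (pvWrap L node) 0 + 1)) := by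
        rw [cnt_set s _ hi]
        rw [← hv]
        split_ifs <;> omega
      have childLoop : ∀ (l : List Int), (∀ m ∈ l, pvWrap L m < L) →
          ∃ k, k ≤ l.length * (D + 2) ^ f ∧ ∀ (stack : List (Int × Bool)) (best : Int) (fB : Nat),
            0 ≤ best → k ≤ fB →
            runB g fB (l.map (fun m => (m, true)) ++ stack)
                (s.set (pvWrap L node) (s.getD (pvWrap L node) 0 + 1)) best
              = runB g (fB - k) stack (s.set (pvWrap L node) (s.getD (pvWrap L node) 0 + 1))
                  (l.foldl (fun r m => max r (checkA g f m
                      (pvCntPos (s.set (pvWrap L node) (s.getD (pvWrap L node) 0 + 1)))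
                      (s.set (pvWrap L node) (s.getD (pvWrap L node) 0 + 1))).1) best) := by
        intro l
        induction l with
        | nil =>
          intro _
          refine ⟨0, Nat.zero_le _, ?_⟩
          intro stack best fB _ _
          simp only [List.map_nil, List.nil_append, List.foldl_nil, Nat.sub_zero]
        | cons m rest ihl =>
          intro hml
          obtain ⟨km, hkm, hrunm⟩ := IH m _ hL1 hInv1 (hml m List.mem_cons_self) (by omega)
          obtain ⟨kr, hkr, hrunr⟩ := ihl (fun x hx => hml x (List.mem_cons_of_mem _ hx))
          refine ⟨km + kr, ?_, ?_⟩
          · simp only [List.length_cons]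
            rw [Nat.succ_mul]
            omega
          · intro stack best fB hb hfb
            simp only [List.map_cons, List.cons_append, List.foldl_cons]
            rw [hrunm (rest.map (fun m => (m, true)) ++ stack) best fB hb (by omega)]
            rw [hrunr stack _ (fB - km) (le_trans hb (le_max_left _ _)) (by omega)]
            congr 1
            omega
      have hCmem : ∀ m ∈ (g.getD node []).filter
          (fun m => decide ((s.set (pvWrap L node) (s.getD (pvWrap L node) 0 + 1)).getD (pvWrap L m) 0 < 2)),
          pvWrap L m < L := by
        intro m hm
        exact HG node m (List.mem_of_mem_filter hm)
      obtain ⟨kc, hkc, hrunc⟩ := childLoop _ hCmem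
      refine ⟨kc + 2, ?_, ?_⟩
      · have e1 : (D + 2) ^ (f + 1) = (D + 2) ^ f * D + 2 * (D + 2) ^ f := by ring
        have e2 : kc ≤ (D + 2) ^ f * D := by
          have h3 : ((g.getD node []).filter
              (fun m => decide ((s.set (pvWrap L node) (s.getD (pvWrap L node) 0 + 1)).getD (pvWrap L m) 0 < 2))).length
              ≤ D := le_trans (List.length_filter_le _ _) (HD node)
          calc kc ≤ _ * (D + 2) ^ f := hkc
            _ ≤ D * (D + 2) ^ f := Nat.mul_le_mul_right _ h3
            _ = (D + 2) ^ f * D := Nat.mul_comm _ _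
        have hP : 1 ≤ (D + 2) ^ f := Nat.one_le_pow _ _ (by omega)
        omega
      · intro stack best fB hb hfb
        cases fB with
        | zero => omega
        | succ fb =>
          simp only [runB, if_true]
          rw [hL, if_neg h2]
          have hpush := push_children (s.set (pvWrap L node) (s.getD (pvWrap L node) 0 + 1))
            (g.getD node []) ((node, false) :: stack)
          simp only [hL1] at hpush ⊢
          rw [hpush]
          rw [hrunc ((node, false) :: stack) _ fb (le_trans hb (le_max_left _ _)) (by omega)]
          have hq : ∃ q, fb - kc = q + 1 := ⟨fb - kc - 1, by omega⟩
          obtain ⟨q, hqe⟩ := hq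
          rw [hqe]
          simp only [runB, Bool.false_eq_true, if_false]
          -- undo frame: decrement restores s
          have hi1 : pvWrap L node <
              (s.set (pvWrap L node) (s.getD (pvWrap L node) 0 + 1)).length := by
            rw [hL1]; exact hn
          have hs1i : (s.set (pvWrap L node) (s.getD (pvWrap L node) 0 + 1)).getD
              (pvWrap L node) 0 = s.getD (pvWrap L node) 0 + 1 := by
            rw [List.getD_eq_getElem _ 0 hi1, List.getElem_set_self hi1]
          have hback : (s.set (pvWrap L node) (s.getD (pvWrap L node) 0 + 1)).set
              (pvWrap L node)
              ((s.set (pvWrap L node) (s.getD (pvWrap L node) 0 + 1)).getD (pvWrap L node) 0 - 1)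
              = s := by
            rw [hs1i, List.set_set]
            have harith : s.getD (pvWrap L node) 0 + 1 - 1 = s.getD (pvWrap L node) 0 := by omega
            rw [harith, hv, List.set_getElem_self hi]
          simp only [List.length_set, hL]
          rw [hback]
          -- value: characterize checkA and pull `best` out of the fold
          rw [checkA_char g L HG f node (pvCntPos s) s hL hn h2]
          simp only []
          rw [hu']
          rw [← foldl_max_pull]
          have hfuel : fb + 1 - (kc + 2) = q := by omega
          rw [hfuel]

theorem pvM_replicate (m : Nat) : pvM (List.replicate m (0 : Int)) = 2 * m := by
  unfold pvM
  induction m with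
  | zero => rfl
  | succ k ih => simp only [List.replicate_succ, List.map_cons, List.sum_cons, ih]; omega

-- ===== VERDICT (by name: the statement is the Claim_ definition above) =====
theorem solution_spec : Claim_equal_solution := by
  intro t _ hpre
  unfold Spec_solution solution solution_alt
  rw [pvGraphB_eq]
  simp only []
  have hsound := graph_sound
    (fun x => -((t.length : Int) + 1) ≤ x ∧ x ≤ (t.length : Int)) t PySem.Dict.empty
    (fun p hp => ⟨⟨(hpre p hp).1.1, (hpre p hp).1.2⟩, ⟨(hpre p hp).2.1, (hpre p hp).2.2⟩⟩)
    (by intro k hk; rw [PySem.Dict.keys_empty] at hk; cases hk)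
    (by intro k m hm; rw [PySem.Dict.getD_empty] at hm; cases hm)
  have HG : ∀ k m, m ∈ (pvGraph t).getD k [] → pvWrap (t.length + 1) m < t.length + 1 := by
    intro k m hm
    exact pvWrap_lt t.length m (hsound.2 k m hm).1 (hsound.2 k m hm).2
  have HD : ∀ k, (((pvGraph t).getD k [] : List Int)).length ≤ 2 * t.length := by
    intro k
    have := graph_deg t PySem.Dict.empty 0
      (by intro k'; rw [PySem.Dict.getD_empty]; exact Nat.le_refl 0) k
    simpa using this
  have hvlen : (List.replicate (t.length + 1) (0 : Int)).length = t.length + 1 :=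
    List.length_replicate
  have hvinv : ∀ x ∈ List.replicate (t.length + 1) (0 : Int), x ≤ 2 := by
    intro x hx
    rw [List.eq_of_mem_replicate hx]
    omega
  have hvM : pvM (List.replicate (t.length + 1) (0 : Int)) < 2 * t.length + 3 := by
    rw [pvM_replicate]
    omega
  have main : ∀ (l : List Int), (∀ x ∈ l, pvWrap (t.length + 1) x < t.length + 1) →
      ∀ (best : Int), 0 ≤ best →
      l.foldl (fun acc x => runB (pvGraph t) ((2 * t.length + 2) ^ (2 * t.length + 3) + 1)
          [(x, true)] acc.2 acc.1) (best, List.replicate (t.length + 1) (0 : Int))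
        = (l.foldl (fun res node => max res
            (checkA (pvGraph t) (2 * t.length + 3) node 0 (List.replicate (t.length + 1) (0 : Int))).1) best,
          List.replicate (t.length + 1) (0 : Int)) := by
    intro l
    induction l with
    | nil => intro _ best _; rfl
    | cons x xs ih =>
      intro hxl best hb
      simp only [List.foldl_cons]
      obtain ⟨k, hk, hrun⟩ := simB (pvGraph t) (t.length + 1) (2 * t.length) HG HD
        (2 * t.length + 3) x (List.replicate (t.length + 1) (0 : Int))
        hvlen hvinv (hxl x List.mem_cons_self) hvM
      rw [hrun [] best ((2 * t.length + 2) ^ (2 * t.length + 3) + 1) hb (by omega)]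
      rw [runB_nil, cnt_replicate]
      have hr : 0 ≤ (checkA (pvGraph t) (2 * t.length + 3) x 0
          (List.replicate (t.length + 1) (0 : Int))).1 :=
        checkA_nonneg (pvGraph t) (t.length + 1) HG _ x 0 _ hvlen
          (hxl x List.mem_cons_self) (le_refl 0)
      exact ih (fun y hy => hxl y (List.mem_cons_of_mem _ hy))
        (max best _) (le_trans hb (le_max_left _ _))
  have hstarts : ∀ x ∈ (if ((pvGraph t).keys.filter
        (fun k => decide (((pvGraph t).getD k []).length = 1))) = []
      then (pvGraph t).keys
      else (pvGraph t).keys.filter (fun k => decide (((pvGraph t).getD k []).length = 1))),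
      pvWrap (t.length + 1) x < t.length + 1 := by
    intro x hx
    have hxkeys : x ∈ (pvGraph t).keys := by
      by_cases hleaf : ((pvGraph t).keys.filter
          (fun k => decide (((pvGraph t).getD k []).length = 1))) = []
      · rw [if_pos hleaf] at hx; exact hx
      · rw [if_neg hleaf] at hx; exact (List.mem_filter.mp hx).1
    exact pvWrap_lt t.length x (hsound.1 x hxkeys).1 (hsound.1 x hxkeys).2
  rw [main _ hstarts 0 (le_refl 0)]
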